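-- pv_equiv track=rewrite | github.com/Viethiep49/VoidRV | backend/services/aspect_extractor.py | _text_to_lower_tokens
-- ===== SOURCE A (Python) =====
-- def _text_to_lower_tokens(text: str) -> set[str]:
--     text = text.lower()
--     # Tách thành bigrams và trigrams + từ đơn để match phrases
--     words = text.split()
--     tokens = set(words)
--     for i in range(len(words) - 1):
--         tokens.add(f"{words[i]} {words[i+1]}")
--     for i in range(len(words) - 2):
--         tokens.add(f"{words[i]} {words[i+1]} {words[i+2]}")
--     return tokens
-- ===== SOURCE B (Python) =====
-- def _text_to_lower_tokens(text: str) -> set[str]: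
--     unis, bis, tris = [], [], []
--     prev = None
--     prev_bi = None
--     for w in text.lower().split():
--         unis.append(w)
--         if prev is not None:
--             bi = prev + " " + w
--             if prev_bi is not None:
--                 tris.append(prev_bi + " " + w)
--             bis.append(bi)
--             prev_bi = bi
--         prev = w
--     return set(unis + bis + tris)
-- ===== Notes on version B (the rewrite author's own statement) =====
-- stated objective: alternative
-- what changed: Replaces the three separate range-indexed scans with one streaming pass that carries the previous word and previous bigram as state (no random access at all): each word extends the carried bigram into a trigram and the carried word into the next bigram, appending into three staged lists that are deduplicated once at the end.
import Mathlib
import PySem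

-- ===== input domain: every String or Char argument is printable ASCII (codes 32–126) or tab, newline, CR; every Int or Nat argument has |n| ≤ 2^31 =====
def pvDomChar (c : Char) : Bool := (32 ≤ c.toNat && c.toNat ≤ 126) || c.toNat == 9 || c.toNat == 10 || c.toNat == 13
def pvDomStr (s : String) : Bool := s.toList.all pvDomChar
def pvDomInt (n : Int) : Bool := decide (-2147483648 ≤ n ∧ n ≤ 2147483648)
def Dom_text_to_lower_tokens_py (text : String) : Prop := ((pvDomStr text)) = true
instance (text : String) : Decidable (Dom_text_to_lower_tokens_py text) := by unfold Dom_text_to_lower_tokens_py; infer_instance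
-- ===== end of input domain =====

-- B replaces the three range-indexed scans with one streaming pass carrying the previous word and
-- previous bigram as state; same token set, no speed claim.
-- ===== PORT A =====
def text_to_lower_tokens_py (text : String) : List String :=
  let text := PySem.Str.lower text
  let words := PySem.Str.split₀ text
  let tokens : PySem.Set String := PySem.Set.ofList words
  let tokens := (PySem.List.pyRange 0 ((words.length : Int) - 1) 1).foldl
    (fun s i => PySem.Set.add s
      (PySem.List.pyGetD words i "" ++ " " ++ PySem.List.pyGetD words (i + 1) "")) tokens
  let tokens := (PySem.List.pyRange 0 ((words.length : Int) - 2) 1).foldl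
    (fun s i => PySem.Set.add s
      (PySem.List.pyGetD words i "" ++ " " ++ PySem.List.pyGetD words (i + 1) "" ++ " " ++
        PySem.List.pyGetD words (i + 2) "")) tokens
  tokens

-- ===== PORT B =====
-- one streaming step: state = (unis, bis, tris, prev word, prev bigram)
def pvAltStep (st : List String × List String × List String × Option String × Option String)
    (w : String) : List String × List String × List String × Option String × Option String :=
  match st with
  | (us, bs, ts, p?, pb?) =>
    match p? with
    | none => (us ++ [w], bs, ts, some w, pb?)
    | some p =>
      let bi := p ++ " " ++ w
      let ts' := match pb? with
        | none => ts
        | some pb => ts ++ [pb ++ " " ++ w]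
      (us ++ [w], bs ++ [bi], ts', some w, some bi)

def text_to_lower_tokens_py_alt (text : String) : List String :=
  let words := PySem.Str.split₀ (PySem.Str.lower text)
  let st := words.foldl pvAltStep ([], [], [], none, none)
  PySem.Set.ofList (st.1 ++ st.2.1 ++ st.2.2.1)

-- ===== PRECONDITION & SPEC =====
def Spec_text_to_lower_tokens_py (text : String) (out : List String) : Prop := out = text_to_lower_tokens_py_alt text
instance (text : String) (out : List String) : Decidable (Spec_text_to_lower_tokens_py text out) := by unfold Spec_text_to_lower_tokens_py; infer_instance

-- ===== CLAIM (what is proved, stated in full; the proofs are below) =====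
def Claim_equal_text_to_lower_tokens_py : Prop := ∀ (text : String), Dom_text_to_lower_tokens_py text → Spec_text_to_lower_tokens_py text (text_to_lower_tokens_py text)

-- ===== LEMMAS AND PROOFS =====
-- The range-indexed bigram map equals the zipWith over the list and its tail.
lemma map_range_bigram (l : List String) :
    (PySem.List.pyRange 0 ((l.length : Int) - 1) 1).map
      (fun i => PySem.List.pyGetD l i "" ++ " " ++ PySem.List.pyGetD l (i + 1) "")
    = List.zipWith (fun a b => a ++ " " ++ b) l (l.drop 1) := by
  rw [PySem.List.pyRange_one]
  rw [List.map_map]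
  apply List.ext_getElem
  · simp; try omega
  · intro i h1 h2
    simp only [List.getElem_map, List.getElem_range, List.getElem_zipWith, Function.comp]
    have hi : i + 1 < l.length := by simp at h1; omega
    rw [show ((0:Int) + (i:Int)) = ((i:Nat):Int) by omega]
    rw [PySem.List.pyGetD_natCast, show ((i:Nat):Int) + 1 = (((i+1):Nat):Int) by omega,
      PySem.List.pyGetD_natCast]
    simp [List.getD_eq_getElem?_getD, hi, Nat.lt_of_succ_lt hi]

-- The range-indexed trigram map equals the zipWith of the bigrams with drop 2.
lemma map_range_trigram (l : List String) :
    (PySem.List.pyRange 0 ((l.length : Int) - 2) 1).map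
      (fun i => PySem.List.pyGetD l i "" ++ " " ++ PySem.List.pyGetD l (i + 1) "" ++ " " ++
        PySem.List.pyGetD l (i + 2) "")
    = List.zipWith (fun ab c => ab ++ " " ++ c)
        (List.zipWith (fun a b => a ++ " " ++ b) l (l.drop 1)) (l.drop 2) := by
  rw [PySem.List.pyRange_one]
  rw [List.map_map]
  apply List.ext_getElem
  · simp; try omega
  · intro i h1 h2
    simp only [List.getElem_map, List.getElem_range, List.getElem_zipWith, Function.comp]
    have hi : i + 2 < l.length := by simp at h1; omega
    rw [show ((0:Int) + (i:Int)) = ((i:Nat):Int) by omega]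
    rw [PySem.List.pyGetD_natCast, show ((i:Nat):Int) + 1 = (((i+1):Nat):Int) by omega,
      PySem.List.pyGetD_natCast, show ((i:Nat):Int) + 2 = (((i+2):Nat):Int) by omega,
      PySem.List.pyGetD_natCast]
    have h1' : i + 1 < l.length := by omega
    have h0 : i < l.length := by omega
    simp [List.getD_eq_getElem?_getD, hi, h1', h0, String.append_assoc]
    congr 1
    omega

-- Unfolding of the streaming fold once both carried states are set.
lemma foldl_pvAltStep_some (l : List String) (us bs ts : List String) (p pbi : String) :
    ∃ q : Option String × Option String,
      l.foldl pvAltStep (us, bs, ts, some p, some pbi)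
      = (us ++ l,
         bs ++ List.zipWith (fun a b => a ++ " " ++ b) (p :: l) l,
         ts ++ List.zipWith (fun a b => a ++ " " ++ b)
            (pbi :: List.zipWith (fun a b => a ++ " " ++ b) (p :: l) l) l,
         q.1, q.2) := by
  induction l generalizing us bs ts p pbi with
  | nil => exact ⟨(some p, some pbi), by simp⟩
  | cons w l ih =>
    obtain ⟨q, hq⟩ := ih (us ++ [w]) (bs ++ [p ++ " " ++ w]) (ts ++ [pbi ++ " " ++ w]) w (p ++ " " ++ w)
    exact ⟨q, by simp [pvAltStep, hq]⟩

-- The streaming fold over the word list yields exactly unigrams, bigrams, trigrams (in that order).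
lemma foldl_pvAltStep_full (ws : List String) :
    ∃ q : Option String × Option String,
      ws.foldl pvAltStep ([], [], [], none, none)
      = (ws,
         List.zipWith (fun a b => a ++ " " ++ b) ws (ws.drop 1),
         List.zipWith (fun ab c => ab ++ " " ++ c)
           (List.zipWith (fun a b => a ++ " " ++ b) ws (ws.drop 1)) (ws.drop 2),
         q.1, q.2) := by
  match ws with
  | [] => exact ⟨(none, none), by simp⟩
  | [a] => exact ⟨(some a, none), by simp [pvAltStep]⟩
  | a :: b :: l =>
    obtain ⟨q, hq⟩ := foldl_pvAltStep_some l [a, b] [a ++ " " ++ b] [] b (a ++ " " ++ b)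
    exact ⟨q, by simp [pvAltStep, hq]⟩

-- ===== VERDICT (by name: the statement is the Claim_ definition above) =====
theorem text_to_lower_tokens_py_spec : Claim_equal_text_to_lower_tokens_py := by
  intro text _
  unfold Spec_text_to_lower_tokens_py text_to_lower_tokens_py text_to_lower_tokens_py_alt
  simp only
  obtain ⟨q, hq⟩ := foldl_pvAltStep_full (PySem.Str.split₀ (PySem.Str.lower text))
  rw [hq]
  rw [← PySem.Set.update_map_eq_foldl_add, ← PySem.Set.update_map_eq_foldl_add]
  rw [map_range_bigram, map_range_trigram]
  rw [← PySem.Set.ofList_append, ← PySem.Set.ofList_append]
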